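-- pv_equiv track=rewrite | github.com/dongyeon-0822/Algorithm | Programmers/Level1/250121_데이터분석.py | solution
-- ===== SOURCE A (Python) =====
-- def solution(data, ext, val_ext, sort_by):
--     answer = []
--     for code, date, maximum, remain in data:
--         if ext == "code":
--             if code < val_ext:
--                 answer.append([code, date, maximum, remain])
--         elif ext == "date":
--             if date < val_ext:
--                 answer.append([code, date, maximum, remain])
--         elif ext == "maximum":
--             if maximum < val_ext:
--                 answer.append([code, date, maximum, remain])
--         else: # ext == "remain"
--             if remain < val_ext:
--                 answer.append([code, date, maximum, remain])
--     if sort_by == "code":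
--         answer.sort(key=lambda x:x[0])
--     elif sort_by == "date":
--         answer.sort(key=lambda x:x[1])
--     elif sort_by == "maximum":
--         answer.sort(key=lambda x:x[2])
--     else: # ext == "remain"
--         answer.sort(key=lambda x:x[3])
--
--     return answer
-- ===== SOURCE B (Python) =====
-- def solution(data, ext, val_ext, sort_by):
--     idx = {"code": 0, "date": 1, "maximum": 2}
--     fi = idx.get(ext, 3)
--     si = idx.get(sort_by, 3)
--     answer = []
--     for row in data:
--         if row[fi] < val_ext:
--             j = 0
--             while j < len(answer) and answer[j][si] <= row[si]:
--                 j += 1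
--             answer.insert(j, list(row))
--     return answer
-- ===== Notes on version B (the rewrite author's own statement) =====
-- stated objective: alternative
-- what changed: Instead of A's filter-into-a-list phase followed by a separate branch-selected .sort() call, B maintains a sorted result online: a single pass over data that, for each kept row, scans the accumulator for its stable insertion point and inserts it there (insertion sort fused with the filter); the field names are resolved to indices once.
import Mathlib
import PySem

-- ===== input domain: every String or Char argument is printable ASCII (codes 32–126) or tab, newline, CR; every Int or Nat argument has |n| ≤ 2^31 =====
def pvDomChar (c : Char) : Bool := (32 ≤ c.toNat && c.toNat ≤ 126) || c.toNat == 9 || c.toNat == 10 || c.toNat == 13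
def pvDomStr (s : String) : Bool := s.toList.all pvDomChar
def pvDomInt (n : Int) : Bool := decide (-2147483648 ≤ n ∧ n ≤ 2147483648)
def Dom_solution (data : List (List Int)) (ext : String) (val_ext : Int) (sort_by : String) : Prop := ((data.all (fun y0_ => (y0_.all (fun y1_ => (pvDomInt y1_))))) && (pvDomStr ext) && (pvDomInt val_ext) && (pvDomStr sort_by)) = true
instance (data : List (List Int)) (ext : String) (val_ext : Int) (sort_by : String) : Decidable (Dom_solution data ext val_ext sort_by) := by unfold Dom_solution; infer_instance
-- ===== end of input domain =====

-- B replaces A's filter-then-sort (four filter branches, four sort calls) by one pass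
-- that keeps the accumulator sorted online via stable insertion (objective: alternative).

-- ===== PORT A =====
def solution (data : List (List Int)) (ext : String) (val_ext : Int) (sort_by : String) : List (List Int) :=
  let answer := data.foldl (fun acc row =>
    match row with
    | [code, date, maximum, remain] =>
      if ext = "code" then
        if code < val_ext then acc ++ [[code, date, maximum, remain]] else acc
      else if ext = "date" then
        if date < val_ext then acc ++ [[code, date, maximum, remain]] else acc
      else if ext = "maximum" then
        if maximum < val_ext then acc ++ [[code, date, maximum, remain]] else acc
      else
        if remain < val_ext then acc ++ [[code, date, maximum, remain]] else acc
    | _ => acc)  -- a row of length ≠ 4 raises ValueError in Python; excluded by Pre_solution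
    []
  if sort_by = "code" then PySem.List.sorted answer (fun x => PySem.List.pyGetD x 0 0) false
  else if sort_by = "date" then PySem.List.sorted answer (fun x => PySem.List.pyGetD x 1 0) false
  else if sort_by = "maximum" then PySem.List.sorted answer (fun x => PySem.List.pyGetD x 2 0) false
  else PySem.List.sorted answer (fun x => PySem.List.pyGetD x 3 0) false

-- ===== PORT B =====
-- B's inner while loop: scan for the first position whose si-field exceeds the key
def pvScan (si : Int) (key : Int) : List (List Int) → Nat
  | [] => 0
  | h :: t => if PySem.List.pyGetD h si 0 ≤ key then pvScan si key t + 1 else 0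

def solution_alt (data : List (List Int)) (ext : String) (val_ext : Int) (sort_by : String) : List (List Int) :=
  let idx : PySem.Dict String Int := PySem.Dict.ofList [("code", 0), ("date", 1), ("maximum", 2)]
  let fi := idx.getD ext 3
  let si := idx.getD sort_by 3
  -- row[fi] / answer[j][si] raise IndexError on a too-short row; excluded by Pre_solution
  -- (pyGetD is total with default 0)
  data.foldl (fun answer row =>
    if PySem.List.pyGetD row fi 0 < val_ext then
      PySem.List.insert answer ((pvScan si (PySem.List.pyGetD row si 0) answer : Nat) : Int) row
    else answer) []

-- ===== PRECONDITION & SPEC =====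
-- Pre_ excludes rows whose length is not 4: there A raises ValueError (unpacking) and B raises IndexError.
def Pre_solution (data : List (List Int)) (ext : String) (val_ext : Int) (sort_by : String) : Prop :=
  ∀ row ∈ data, row.length = 4
instance (data : List (List Int)) (ext : String) (val_ext : Int) (sort_by : String) : Decidable (Pre_solution data ext val_ext sort_by) := by unfold Pre_solution; infer_instance
def pvWitness_solution : List (List Int) × String × Int × String := ([[1, 20, 3, 4], [2, 10, 5, 1]], "maximum", 6, "date")

def Spec_solution (data : List (List Int)) (ext : String) (val_ext : Int) (sort_by : String) (out : List (List Int)) : Prop := out = solution_alt data ext val_ext sort_by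
instance (data : List (List Int)) (ext : String) (val_ext : Int) (sort_by : String) (out : List (List Int)) : Decidable (Spec_solution data ext val_ext sort_by out) := by unfold Spec_solution; infer_instance

-- ===== CLAIM (what is proved, stated in full; the proofs are below) =====
def Claim_equal_solution : Prop := ∀ (data : List (List Int)) (ext : String) (val_ext : Int) (sort_by : String), Dom_solution data ext val_ext sort_by → Pre_solution data ext val_ext sort_by → Spec_solution data ext val_ext sort_by (solution data ext val_ext sort_by)

-- ===== LEMMAS AND PROOFS =====

-- the literal name→index dict of B, characterised
theorem pvIdx_getD (s : String) :
    (PySem.Dict.ofList [("code", (0 : Int)), ("date", 1), ("maximum", 2)]).getD s 3 =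
      if s = "code" then 0 else if s = "date" then 1 else if s = "maximum" then 2 else 3 := by
  simp only [PySem.Dict.ofList, PySem.Dict.update, List.foldl, PySem.Dict.getD_insert,
    PySem.Dict.getD_empty]
  split_ifs <;> simp_all

theorem pv_row4 (row : List Int) (h : row.length = 4) :
    ∃ a b c d : Int, row = [a, b, c, d] := by
  rcases row with _ | ⟨a, _ | ⟨b, _ | ⟨c, _ | ⟨d, _ | ⟨e, t⟩⟩⟩⟩⟩ <;> simp_all

theorem pvScan_le (si key : Int) (l : List (List Int)) : pvScan si key l ≤ l.length := by
  induction l with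
  | nil => simp [pvScan]
  | cons h t ih => simp only [pvScan]; split_ifs <;> simp <;> omega

-- B's scan-and-insert step is exactly the stable insertBy step of PySem's sorted
theorem pv_insert_eq_insertBy (si : Int) (row : List Int) (l : List (List Int)) :
    PySem.List.insert l ((pvScan si (PySem.List.pyGetD row si 0) l : Nat) : Int) row =
      PySem.List.insertBy
        (fun a b => decide (PySem.List.pyGetD a si 0 < PySem.List.pyGetD b si 0)) row l := by
  rw [PySem.List.insert_natCast l _ row (pvScan_le _ _ _)]
  induction l with
  | nil => simp [pvScan, PySem.List.insertBy]
  | cons h t ih =>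
    simp only [pvScan, PySem.List.insertBy]
    by_cases hc : PySem.List.pyGetD h si 0 ≤ PySem.List.pyGetD row si 0
    · have : ¬ PySem.List.pyGetD row si 0 < PySem.List.pyGetD h si 0 := by omega
      simp [hc, this, ih]
    · have : PySem.List.pyGetD row si 0 < PySem.List.pyGetD h si 0 := by omega
      simp [hc, this]

-- A's accumulation loop equals the uniform filter by the fi-th field
theorem pv_fold_eq_filter (data : List (List Int)) (ext : String) (val_ext : Int)
    (hpre : ∀ row ∈ data, row.length = 4) :
    data.foldl (fun acc row =>
      match row with
      | [code, date, maximum, remain] =>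
        if ext = "code" then
          if code < val_ext then acc ++ [[code, date, maximum, remain]] else acc
        else if ext = "date" then
          if date < val_ext then acc ++ [[code, date, maximum, remain]] else acc
        else if ext = "maximum" then
          if maximum < val_ext then acc ++ [[code, date, maximum, remain]] else acc
        else
          if remain < val_ext then acc ++ [[code, date, maximum, remain]] else acc
      | _ => acc) [] =
    data.filter (fun row =>
      PySem.List.pyGetD row
        ((PySem.Dict.ofList [("code", (0 : Int)), ("date", 1), ("maximum", 2)]).getD ext 3) 0
        < val_ext) := by
  rw [PySem.List.foldl_congr_mem (g := fun acc row =>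
        if PySem.List.pyGetD row
            ((PySem.Dict.ofList [("code", (0 : Int)), ("date", 1), ("maximum", 2)]).getD ext 3) 0
            < val_ext then acc ++ [row] else acc)]
  · exact PySem.List.foldl_append_ite_eq_filter _ _ _
  · intro acc row hrow
    obtain ⟨a, b, c, d, rfl⟩ := pv_row4 row (hpre row hrow)
    rw [pvIdx_getD]
    by_cases h1 : ext = "code" <;> by_cases h2 : ext = "date" <;>
      by_cases h3 : ext = "maximum" <;>
      simp [h1, h2, h3, PySem.List.pyGetD]

-- B's fused pass = sorted(filtered list) with the si-th field as key
theorem pv_alt_eq_sorted_filter (data : List (List Int)) (ext : String) (val_ext : Int)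
    (sort_by : String) :
    solution_alt data ext val_ext sort_by =
      PySem.List.sorted
        (data.filter (fun row =>
          PySem.List.pyGetD row
            ((PySem.Dict.ofList [("code", (0 : Int)), ("date", 1), ("maximum", 2)]).getD ext 3) 0
            < val_ext))
        (fun r => PySem.List.pyGetD r
          ((PySem.Dict.ofList [("code", (0 : Int)), ("date", 1), ("maximum", 2)]).getD sort_by 3) 0)
        false := by
  unfold solution_alt
  rw [PySem.List.sorted_eq_foldl_insertBy, List.foldl_filter]
  apply PySem.List.foldl_congr_mem
  intro acc row _
  by_cases hp : PySem.List.pyGetD row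
      ((PySem.Dict.ofList [("code", (0 : Int)), ("date", 1), ("maximum", 2)]).getD ext 3) 0
      < val_ext <;>
    simp [hp, pv_insert_eq_insertBy]

-- ===== VERDICT (by name: the statement is the Claim_ definition above) =====
theorem solution_spec : Claim_equal_solution := by
  intro data ext val_ext sort_by _hdom hpre
  unfold Spec_solution
  rw [pv_alt_eq_sorted_filter]
  unfold solution
  rw [pv_fold_eq_filter data ext val_ext hpre]
  simp only [pvIdx_getD]
  by_cases h1 : sort_by = "code" <;> by_cases h2 : sort_by = "date" <;>
    by_cases h3 : sort_by = "maximum" <;> simp [h1, h2, h3]
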